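-- pv_equiv track=rewrite | github.com/Tammon23/CSSAdventOfCode | 2025/Day 6/Dec6_P2.py | solve
-- ===== SOURCE A (Python) =====
-- def solve(data: list[str], operators: list[str]) -> int:
--     total = 0
--     operator_index = 0
--     temp = operators[operator_index] != "+"
--
--     for number in data:
--         if number == "":
--             total += temp
--             operator_index += 1
--             temp = operators[operator_index] != "+"
--
--         else:
--             x = int(number)
--             if operators[operator_index] == "+":
--                 temp += x
--             else:
--                 temp *= x
--
--     return total + temp
-- ===== SOURCE B (Python) =====
-- def solve(data: list[str], operators: list[str]) -> int:
--     # split into groups on "" separators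
--     groups = [[]]
--     for number in data:
--         if number == "":
--             groups.append([])
--         else:
--             groups[-1].append(number)
--     total = 0
--     for i, group in enumerate(groups):
--         vals = [int(x) for x in group]
--         if operators[i] == "+":
--             total += sum(vals)
--         else:
--             prod = 1
--             for v in vals:
--                 prod *= v
--             total += prod
--     return total
-- ===== Notes on version B (the rewrite author's own statement) =====
-- stated objective: alternative
-- what changed: B first splits data into groups on the empty-string separators and then evaluates each group independently (sum or product per its operator), instead of A's single-pass state machine that threads a running temp/operator_index through the whole list.
import Mathlib
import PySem

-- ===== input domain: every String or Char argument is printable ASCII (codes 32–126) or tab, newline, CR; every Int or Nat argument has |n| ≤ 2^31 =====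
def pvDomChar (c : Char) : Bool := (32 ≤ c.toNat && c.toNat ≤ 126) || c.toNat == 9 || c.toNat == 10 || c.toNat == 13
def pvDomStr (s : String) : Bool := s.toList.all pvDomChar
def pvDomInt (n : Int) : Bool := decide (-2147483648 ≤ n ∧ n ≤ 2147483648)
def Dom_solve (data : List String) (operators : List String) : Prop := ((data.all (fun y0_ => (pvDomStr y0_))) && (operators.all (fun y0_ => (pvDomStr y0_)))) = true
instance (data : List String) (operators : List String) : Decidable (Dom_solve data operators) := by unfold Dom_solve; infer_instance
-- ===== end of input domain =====

-- B restructures A's single-pass state machine into: split the data into groups on "" separators,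
-- then evaluate each group with its operator (sum for "+", product otherwise) and total the results.

def pvVal (x : String) : Int := (PySem.Int.ofStr? x).getD 0

-- ===== PORT A =====
-- one step of A's for-loop; state = (total, operator_index, temp).
-- operators[operator_index] is ported as getD (index is a nonnegative in-range Nat under Pre_;
-- outside Pre_ Python raises IndexError); int(number) is PySem.Int.ofStr? (.getD 0: under Pre_ it parses).
def solveStep (operators : List String) : Int × Nat × Int → String → Int × Nat × Int
  | (total, oi, temp), number =>
    if number = "" then
      (total + temp, oi + 1, if operators.getD (oi + 1) "" ≠ "+" then 1 else 0)
    else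
      let x := pvVal number
      if operators.getD oi "" = "+" then (total, oi, temp + x) else (total, oi, temp * x)

def solve (data : List String) (operators : List String) : Int :=
  let init : Int × Nat × Int := (0, 0, if operators.getD 0 "" ≠ "+" then 1 else 0)
  let r := data.foldl (solveStep operators) init
  r.1 + r.2.2

-- ===== PORT B =====
-- groups = [[]]; append to last group / start new group on "" — kept as a foldl with the
-- groups in reverse (current group also reversed), reversed back at the end.
def groupsOf (data : List String) : List (List String) :=
  let r := data.foldl
    (fun (st : List String × List (List String)) n =>
      if n = "" then ([], st.1.reverse :: st.2) else (n :: st.1, st.2))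
    ([], [])
  (r.1.reverse :: r.2).reverse

def evalGroup (op : String) (g : List String) : Int :=
  let vals := g.map pvVal
  if op = "+" then vals.sum else vals.foldl (· * ·) 1

-- the 'for i, group in enumerate(groups): total += …' loop
def sumGroups (operators : List String) (total : Int) (i : Nat) : List (List String) → Int
  | [] => total
  | g :: gs => sumGroups operators (total + evalGroup (operators.getD i "") g) (i + 1) gs

def solve_alt (data : List String) (operators : List String) : Int :=
  sumGroups operators 0 0 (groupsOf data)

-- ===== PRECONDITION & SPEC =====
-- Pre_ excludes exactly the inputs where the Python A raises: IndexError when there are at least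
-- as many "" separators as operators remaining (including the initial operators[0] access), and
-- ValueError when a non-separator entry is not a valid int literal.
def Pre_solve (data : List String) (operators : List String) : Prop :=
  data.count "" + 1 ≤ operators.length ∧
  ∀ s ∈ data, s ≠ "" → (PySem.Int.ofStr? s).isSome
instance (data : List String) (operators : List String) : Decidable (Pre_solve data operators) := by
  unfold Pre_solve; infer_instance

def pvWitness_solve : List String × List String := (["1", "2", "", "3"], ["+", "*"])

def Spec_solve (data : List String) (operators : List String) (out : Int) : Prop := out = solve_alt data operators
instance (data : List String) (operators : List String) (out : Int) : Decidable (Spec_solve data operators out) := by unfold Spec_solve; infer_instance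

-- ===== CLAIM (what is proved, stated in full; the proofs are below) =====
def Claim_equal_solve : Prop := ∀ (data : List String) (operators : List String), Dom_solve data operators → Pre_solve data operators → Spec_solve data operators (solve data operators)

-- ===== LEMMAS AND PROOFS =====

-- head-first recursive characterisation of the grouping
def groupsRec : List String → List (List String)
  | [] => [[]]
  | n :: rest =>
    if n = "" then [] :: groupsRec rest
    else
      match groupsRec rest with
      | [] => [[n]]
      | g :: gs => (n :: g) :: gs

theorem groupsRec_ne_nil (data : List String) : groupsRec data ≠ [] := by
  cases data with
  | nil => simp [groupsRec]
  | cons n rest =>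
    simp only [groupsRec]
    split
    · simp
    · split <;> simp

-- consHead c prepends c to the first group
def consHead (c : List String) : List (List String) → List (List String)
  | [] => [c]
  | g :: gs => (c ++ g) :: gs

theorem groupsOf_fold_eq (data : List String) :
    ∀ (cur : List String) (acc : List (List String)),
      (((data.foldl
        (fun (st : List String × List (List String)) n =>
          if n = "" then ([], st.1.reverse :: st.2) else (n :: st.1, st.2)) (cur, acc)).1.reverse ::
        (data.foldl
        (fun (st : List String × List (List String)) n =>
          if n = "" then ([], st.1.reverse :: st.2) else (n :: st.1, st.2)) (cur, acc)).2).reverse)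
      = acc.reverse ++ consHead cur.reverse (groupsRec data) := by
  induction data with
  | nil => intro cur acc; simp [groupsRec, consHead]
  | cons n rest ih =>
    intro cur acc
    by_cases hn : n = ""
    · simp only [List.foldl_cons, hn, groupsRec, if_true]
      rw [ih [] (cur.reverse :: acc)]
      cases h : groupsRec rest with
      | nil => exact absurd h (groupsRec_ne_nil rest)
      | cons g gs => simp [consHead]
    · simp only [List.foldl_cons, if_neg hn, groupsRec]
      rw [ih (n :: cur) acc]
      cases h : groupsRec rest with
      | nil => simp [consHead]
      | cons g gs => simp [consHead]

theorem groupsOf_eq (data : List String) : groupsOf data = groupsRec data := by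
  have := groupsOf_fold_eq data [] []
  simp only [groupsOf]
  rw [this]
  cases h : groupsRec data with
  | nil => exact absurd h (groupsRec_ne_nil data)
  | cons g gs => simp [consHead]

-- continue accumulating A's temp over the rest of the current group
def contGroup (operators : List String) (oi : Nat) (temp : Int) (g : List String) : Int :=
  if operators.getD oi "" = "+" then temp + (g.map pvVal).sum
  else temp * (g.map pvVal).foldl (· * ·) 1

theorem evalGroup_eq_cont (operators : List String) (oi : Nat) (g : List String) :
    evalGroup (operators.getD oi "") g
      = contGroup operators oi (if operators.getD oi "" ≠ "+" then 1 else 0) g := by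
  simp only [evalGroup, contGroup]
  split_ifs with h <;> simp_all

theorem foldl_mul_pull (l : List Int) (a : Int) :
    l.foldl (· * ·) a = a * l.foldl (· * ·) 1 := by
  induction l generalizing a with
  | nil => simp
  | cons x xs ih =>
    simp only [List.foldl_cons]
    rw [ih (a * x), ih (1 * x)]
    ring

theorem sumGroups_pull (operators : List String) (gs : List (List String)) :
    ∀ (t : Int) (i : Nat), sumGroups operators t i gs = t + sumGroups operators 0 i gs := by
  induction gs with
  | nil => intro t i; simp [sumGroups]
  | cons g gs ih =>
    intro t i
    simp only [sumGroups]
    rw [ih (t + _), ih (0 + _)]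
    ring

-- main invariant: A's fold from state (total, oi, temp) = total + finish current group with temp
-- + evaluate the remaining groups
theorem solve_fold_eq (operators : List String) (data : List String) :
    ∀ (total temp : Int) (oi : Nat),
      ((data.foldl (solveStep operators) (total, oi, temp)).1
        + (data.foldl (solveStep operators) (total, oi, temp)).2.2)
      = total + contGroup operators oi temp (groupsRec data).headI
          + sumGroups operators 0 (oi + 1) (groupsRec data).tail := by
  induction data with
  | nil =>
    intro total temp oi
    simp only [List.foldl_nil, groupsRec, List.headI, List.tail, sumGroups, contGroup]
    split_ifs <;> simp
  | cons n rest ih =>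
    intro total temp oi
    by_cases hn : n = ""
    · simp only [List.foldl_cons, solveStep, hn, groupsRec, if_true]
      rw [ih (total + temp) _ (oi + 1)]
      simp only [List.headI, List.tail]
      cases h : groupsRec rest with
      | nil => exact absurd h (groupsRec_ne_nil rest)
      | cons g gs =>
        simp only [sumGroups]
        have hc : contGroup operators oi temp [] = temp := by
          simp only [contGroup]; split_ifs <;> simp
        rw [evalGroup_eq_cont operators (oi + 1) g, hc]
        conv_rhs => rw [sumGroups_pull]
        ring
    · simp only [List.foldl_cons, solveStep, if_neg hn]
      by_cases hop : operators.getD oi "" = "+"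
      · rw [if_pos hop, ih total (temp + pvVal n) oi]
        simp only [groupsRec, if_neg hn]
        cases h : groupsRec rest with
        | nil => exact absurd h (groupsRec_ne_nil rest)
        | cons g gs =>
          simp only [List.headI, List.tail, contGroup, if_pos hop, List.map_cons, List.sum_cons]
          ring
      · rw [if_neg hop, ih total (temp * pvVal n) oi]
        simp only [groupsRec, if_neg hn]
        cases h : groupsRec rest with
        | nil => exact absurd h (groupsRec_ne_nil rest)
        | cons g gs =>
          simp only [List.headI, List.tail, contGroup, if_neg hop, List.map_cons, List.foldl_cons]
          rw [foldl_mul_pull (g.map pvVal) (1 * pvVal n), foldl_mul_pull]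
          ring

-- ===== VERDICT (by name: the statement is the Claim_ definition above) =====
theorem solve_spec : Claim_equal_solve := by
  intro data operators _ _
  unfold Spec_solve solve solve_alt
  rw [groupsOf_eq, solve_fold_eq operators data 0 _ 0]
  cases h : groupsRec data with
  | nil => exact absurd h (groupsRec_ne_nil data)
  | cons g gs =>
    simp only [List.headI, List.tail, sumGroups]
    rw [evalGroup_eq_cont operators 0 g]
    conv_rhs => rw [sumGroups_pull]
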